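-- pv_equiv track=rewrite | github.com/wlsh44/algorithm | programmers/172927.py | solution
-- ===== SOURCE A (Python) =====
-- def fatigue_sum(minerals, pick):
--     fatigue = 0
--     for mineral in minerals:
--         if pick == 0:
--             fatigue += 1
--         elif pick == 1:
--             if mineral == "diamond":
--                 fatigue += 5
--             else:
--                 fatigue += 1
--         else:
--             if mineral == "diamond":
--                 fatigue += 25
--             elif mineral == "iron":
--                 fatigue += 5
--             else:
--                 fatigue += 1
--     return fatigue
--
-- def sort_key(minerals):
--     fatigue = 0
--     for mineral in minerals:
--         if mineral == "diamond":
--             fatigue += 25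
--         elif mineral == "iron":
--             fatigue += 5
--         else:
--             fatigue += 1
--     return -fatigue
--
-- def solution(picks, minerals):
--     answer = 0
--     arr = []
--     for i in range(len(minerals)):
--         if i % 5 == 0:
--             arr.append([])
--         arr[-1].append(minerals[i])
--
--     pick_cnt = sum(picks)
--     arr = arr[:pick_cnt]
--     arr.sort(key=lambda x: (sort_key(x), len(x)))
--     pick = 0
--     for minerals in arr:
--         while picks[pick] == 0:
--             pick += 1
--         answer += fatigue_sum(minerals, pick)
--         picks[pick] -= 1
--     return answer
-- ===== SOURCE B (Python) =====
-- def solution(picks, minerals):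
--     # counting-sort into (value, size) buckets instead of a comparison sort,
--     # and batch tier assignment (take = min(cnt, picks[pick])) instead of a per-chunk greedy walk
--     keys = []
--     j = 0
--     while j < len(minerals):
--         d = i = o = 0
--         for m in minerals[j:j + 5]:
--             if m == "diamond":
--                 d += 1
--             elif m == "iron":
--                 i += 1
--             else:
--                 o += 1
--         keys.append((25 * d + 5 * i + o, d + i + o))
--         j += 5
--     keys = keys[:sum(picks)]
--     buckets = {}
--     for key in keys:
--         buckets[key] = buckets.get(key, 0) + 1
--     answer = 0
--     pick = 0
--     for v in range(125, 0, -1):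
--         for s in range(1, 6):
--             cnt = buckets.get((v, s), 0)
--             while cnt > 0:
--                 while picks[pick] == 0:
--                     pick += 1
--                 take = min(cnt, picks[pick])
--                 if pick == 0:
--                     answer += take * s
--                 elif pick == 1:
--                     answer += take * (4 * ((v - s) // 4 // 6) + s)
--                 else:
--                     answer += take * v
--                 picks[pick] -= take
--                 cnt -= take
--     return answer
-- ===== Notes on version B (the rewrite author's own statement) =====
-- stated objective: alternative
-- what changed: B drops A's comparison sort and per-chunk greedy walk: it reduces each 5-chunk to a (value, size) key in one pass, counting-sorts the keys into a bucket counter, iterates the fixed 125x5 key grid best-first, and assigns pickaxe tiers in batches (take = min(count, picks[pick]) chunks at a time) with closed-form costs instead of walking chunks one by one.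
-- outside the precondition, e.g. on solution([-2, 2, 6, 10], ['n', 'iron', 'diamond', 'ma']): A returns 4, B returns 40
import Mathlib
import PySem

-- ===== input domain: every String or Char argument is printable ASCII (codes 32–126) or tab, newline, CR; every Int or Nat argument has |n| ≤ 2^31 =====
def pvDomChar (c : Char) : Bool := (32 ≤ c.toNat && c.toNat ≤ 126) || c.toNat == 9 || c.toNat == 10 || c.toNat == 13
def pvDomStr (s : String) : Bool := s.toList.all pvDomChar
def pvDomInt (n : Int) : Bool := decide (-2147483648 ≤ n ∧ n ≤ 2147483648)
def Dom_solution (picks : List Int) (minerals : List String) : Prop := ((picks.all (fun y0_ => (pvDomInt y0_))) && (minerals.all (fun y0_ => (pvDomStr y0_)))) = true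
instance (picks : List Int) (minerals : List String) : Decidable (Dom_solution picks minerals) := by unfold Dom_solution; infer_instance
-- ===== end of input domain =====

-- B replaces A's comparison sort + per-chunk greedy walk by a counting sort into (value, size)
-- buckets and batch tier assignment; both Pythons mutate `picks` in place the same way — the
-- theorems are about the return value.

-- ===== PORT A =====
def fatigueSum (minerals : List String) (pick : Nat) : Int :=
  minerals.foldl (fun fatigue mineral =>
    if pick == 0 then fatigue + 1
    else if pick == 1 then
      (if mineral == "diamond" then fatigue + 5 else fatigue + 1)
    else
      (if mineral == "diamond" then fatigue + 25
       else if mineral == "iron" then fatigue + 5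
       else fatigue + 1)) 0

def sortKey (minerals : List String) : Int :=
  -(minerals.foldl (fun fatigue mineral =>
      if mineral == "diamond" then fatigue + 25
      else if mineral == "iron" then fatigue + 5
      else fatigue + 1) 0)

-- `while picks[pick] == 0: pick += 1` — scans forward for the first non-zero entry;
-- `none` models Python's IndexError (never reached on the admitted inputs).
def skipZeros (picks : List Int) (pick : Nat) : Option Nat :=
  ((picks.drop pick).findIdx? (fun v => v != 0)).map (pick + ·)

def buildStep (minerals : List String) (arr : List (List String)) (i : Int) : List (List String) :=
  let arr := if PySem.Int.mod i 5 == 0 then arr ++ [([] : List String)] else arr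
  arr.dropLast ++ [(arr.getLast?.getD []) ++ [PySem.List.pyGetD minerals i ""]]

def greedyStepA (st : Int × Nat × List Int) (chunk : List String) : Int × Nat × List Int :=
  match skipZeros st.2.2 st.2.1 with
  | none => st
  | some p => (st.1 + fatigueSum chunk p, p, st.2.2.set p (st.2.2.getD p 0 - 1))

def solution (picks : List Int) (minerals : List String) : Int :=
  let arr : List (List String) :=
    (PySem.List.pyRange 0 (minerals.length : Int) 1).foldl (buildStep minerals) []
  let pickCnt : Int := picks.foldl (· + ·) 0
  let arr := PySem.List.slice arr none (some pickCnt)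
  let arr := PySem.List.sorted2 arr sortKey (fun x => (x.length : Int)) false
  (arr.foldl greedyStepA (0, 0, picks)).1

-- ===== PORT B =====
-- the `for m in minerals[j:j+5]` counting loop of Source B
def countChunk (chunk : List String) : Int × Int × Int :=
  chunk.foldl (fun (c : Int × Int × Int) m =>
    if m == "diamond" then (c.1 + 1, c.2.1, c.2.2)
    else if m == "iron" then (c.1, c.2.1 + 1, c.2.2)
    else (c.1, c.2.1, c.2.2 + 1)) (0, 0, 0)

-- the `while j < len(minerals): … j += 5` key-building loop of Source B
def keysAux (minerals : List String) (j : Nat) : List (Int × Int) :=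
  if h : j < minerals.length then
    (let c := countChunk (PySem.List.slice minerals (some (j : Int)) (some ((j : Int) + 5)));
     (25 * c.1 + 5 * c.2.1 + c.2.2, c.1 + c.2.1 + c.2.2)) ::
      keysAux minerals (j + 5)
  else []
termination_by minerals.length - j

-- the inner `while cnt > 0` batch loop of Source B; fuel = the initial cnt bounds its iterations
-- (each pass removes at least one chunk on the admitted inputs); `none` from skipZeros models
-- Python's IndexError as in port A.
def consume (v s : Int) : Nat → Int → Int × Nat × List Int → Int × Nat × List Int
  | 0, _, st => st
  | fuel + 1, cnt, st =>
    if cnt ≤ 0 then st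
    else
      match skipZeros st.2.2 st.2.1 with
      | none => st
      | some p =>
        let avail := st.2.2.getD p 0
        let take := min cnt avail
        let cost := if p == 0 then s
                    else if p == 1 then 4 * PySem.Int.floordiv (PySem.Int.floordiv (v - s) 4) 6 + s
                    else v
        consume v s fuel (cnt - take) (st.1 + take * cost, p, st.2.2.set p (avail - take))

def solution_alt (picks : List Int) (minerals : List String) : Int :=
  let keys := PySem.List.slice (keysAux minerals 0) none (some (picks.foldl (· + ·) 0))
  let buckets := keys.foldl (fun d k => d.insert k (d.getD k 0 + 1)) PySem.Dict.empty
  ((PySem.List.pyRange 125 0 (-1)).foldl (fun st v =>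
      (PySem.List.pyRange 1 6 1).foldl (fun st s =>
        consume v s (buckets.getD (v, s) 0).toNat (buckets.getD (v, s) 0) st) st)
    ((0 : Int), (0 : Nat), picks)).1

-- ===== PRECONDITION & SPEC =====
-- Pre_ excludes negative entries in picks — negative pick counts are outside the task's natural
-- domain (picks are how many times each pickaxe may be used), and A's behaviour there (a negative
-- sum trimming chunks off the END via arr[:pick_cnt], a negative count that never reaches zero)
-- is an accident of its implementation.
def Pre_solution (picks : List Int) (minerals : List String) : Prop := ∀ x ∈ picks, 0 ≤ x
instance (picks : List Int) (minerals : List String) : Decidable (Pre_solution picks minerals) := by unfold Pre_solution; infer_instance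

def pvWitness_solution : List Int × List String :=
  ([1, 2, 0], ["diamond", "iron", "stone", "stone", "iron", "diamond", "diamond"])

def Spec_solution (picks : List Int) (minerals : List String) (out : Int) : Prop := out = solution_alt picks minerals
instance (picks : List Int) (minerals : List String) (out : Int) : Decidable (Spec_solution picks minerals out) := by unfold Spec_solution; infer_instance

-- ===== CLAIM (what is proved, stated in full; the proofs are below) =====
def Claim_equal_solution : Prop := ∀ (picks : List Int) (minerals : List String), Dom_solution picks minerals → Pre_solution picks minerals → Spec_solution picks minerals (solution picks minerals)

-- ===== LEMMAS AND PROOFS =====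

-- ---- counting characterisations of A's helpers ----
def cntD (l : List String) : Int := l.countP (fun m => m == "diamond")
def cntI (l : List String) : Int := l.countP (fun m => !(m == "diamond") && m == "iron")
def cntE (l : List String) : Int := l.countP (fun m => !(m == "diamond") && !(m == "iron"))

theorem len_DIE (l : List String) : (l.length : Int) = cntD l + cntI l + cntE l := by
  induction l with
  | nil => simp [cntD, cntI, cntE]
  | cons m t ih =>
    by_cases hd : m = "diamond" <;> by_cases hi : m = "iron" <;>
      simp [cntD, cntI, cntE, List.countP_cons, hd, hi] at ih ⊢ <;> push_cast <;> omega

theorem countChunk_eq (l : List String) : countChunk l = (cntD l, cntI l, cntE l) := by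
  suffices h : ∀ (c : Int × Int × Int),
      l.foldl (fun (c : Int × Int × Int) m =>
        if m == "diamond" then (c.1 + 1, c.2.1, c.2.2)
        else if m == "iron" then (c.1, c.2.1 + 1, c.2.2)
        else (c.1, c.2.1, c.2.2 + 1)) c = (c.1 + cntD l, c.2.1 + cntI l, c.2.2 + cntE l) by
    simpa [countChunk] using h (0, 0, 0)
  induction l with
  | nil => intro c; simp [cntD, cntI, cntE]
  | cons m t ih =>
    intro c
    obtain ⟨x, y, z⟩ := c
    by_cases hd : m = "diamond" <;> by_cases hi : m = "iron" <;>
      simp only [List.foldl_cons] <;> rw [ih] <;>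
      simp [cntD, cntI, cntE, List.countP_cons, hd, hi, Prod.ext_iff] <;>
      push_cast <;> omega

theorem sortKey_eq (l : List String) : sortKey l = -(25 * cntD l + 5 * cntI l + cntE l) := by
  suffices h : ∀ (a : Int),
      l.foldl (fun fatigue mineral =>
        if mineral == "diamond" then fatigue + 25
        else if mineral == "iron" then fatigue + 5
        else fatigue + 1) a = a + (25 * cntD l + 5 * cntI l + cntE l) by
    have := h 0; simp [sortKey] at this ⊢; rw [this]; ring
  induction l with
  | nil => intro a; simp [cntD, cntI, cntE]
  | cons m t ih =>
    intro a
    by_cases hd : m = "diamond" <;> by_cases hi : m = "iron" <;>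
      simp only [List.foldl_cons] <;> rw [ih] <;>
      simp [cntD, cntI, cntE, List.countP_cons, hd, hi] <;>
      push_cast <;> omega

theorem fatigueSum_eq (l : List String) (p : Nat) :
    fatigueSum l p = (if p == 0 then cntD l + cntI l + cntE l
                      else if p == 1 then 5 * cntD l + cntI l + cntE l
                      else 25 * cntD l + 5 * cntI l + cntE l) := by
  suffices h : ∀ (a : Int),
      l.foldl (fun fatigue mineral =>
        if p == 0 then fatigue + 1
        else if p == 1 then
          (if mineral == "diamond" then fatigue + 5 else fatigue + 1)
        else
          (if mineral == "diamond" then fatigue + 25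
           else if mineral == "iron" then fatigue + 5
           else fatigue + 1)) a =
        a + (if p == 0 then cntD l + cntI l + cntE l
             else if p == 1 then 5 * cntD l + cntI l + cntE l
             else 25 * cntD l + 5 * cntI l + cntE l) by
    simpa [fatigueSum] using h 0
  induction l with
  | nil => intro a; simp [cntD, cntI, cntE]
  | cons m t ih =>
    intro a
    by_cases hp0 : p = 0 <;> by_cases hp1 : p = 1 <;>
      by_cases hd : m = "diamond" <;> by_cases hi : m = "iron" <;>
      simp only [List.foldl_cons] <;> rw [ih] <;>
      simp [cntD, cntI, cntE, List.countP_cons, hd, hi, hp0, hp1] <;>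
      push_cast <;> omega

-- ---- the ideal 5-chunking and A's building loop ----
def chunks5 (l : List String) : List (List String) :=
  if h : l = [] then [] else l.take 5 :: chunks5 (l.drop 5)
termination_by l.length
decreasing_by
  cases l with
  | nil => simp at h
  | cons a t => simp [List.length_drop]

theorem chunks5_nil : chunks5 [] = [] := by simp [chunks5]

theorem chunks5_ne_nil {l : List String} (h : l ≠ []) : chunks5 l ≠ [] := by
  rw [chunks5]; simp [h]

theorem chunks5_small {l : List String} (h1 : l ≠ []) (h2 : l.length ≤ 5) :
    chunks5 l = [l] := by
  rw [chunks5]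
  simp [h1, List.take_of_length_le h2, List.drop_eq_nil_of_le h2, chunks5_nil]

theorem chunks5_block {c rest : List String} (h : c.length = 5) :
    chunks5 (c ++ rest) = c :: chunks5 rest := by
  have hc : c ≠ [] := by intro hc; simp [hc] at h
  rw [chunks5]
  have hne : c ++ rest ≠ [] := by simp [hc]
  rw [dif_neg hne]
  rw [List.take_append_of_le_length (by omega), List.take_of_length_le (by omega),
      List.drop_append_of_le_length (by omega), List.drop_of_length_le (by omega)]
  simp

theorem take_succ_getD (l : List String) (k : Nat) (hk : k < l.length) :
    l.take (k + 1) = l.take k ++ [l.getD k ""] := by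
  rw [List.take_succ, List.getElem?_eq_getElem hk, List.getD_eq_getElem l "" hk]
  rfl

theorem chunks5_take_succ (k : Nat) : ∀ (l : List String), k < l.length →
    chunks5 (l.take (k + 1)) =
      if k % 5 = 0 then chunks5 (l.take k) ++ [[l.getD k ""]]
      else (chunks5 (l.take k)).dropLast ++
        [((chunks5 (l.take k)).getLast?.getD []) ++ [l.getD k ""]] := by
  induction k using Nat.strong_induction_on with
  | _ k IH =>
    intro l hk
    by_cases h5 : k < 5
    · by_cases h0 : k = 0
      · subst h0
        rw [if_pos (by omega), take_succ_getD l 0 hk, List.take_zero]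
        rw [chunks5_nil, chunks5_small (by simp) (by simp)]
        simp
      · rw [if_neg (by omega)]
        have hnil : l ≠ [] := by intro h; subst h; simp at hk
        have hk1 : l.take k ≠ [] := by
          simp [List.take_eq_nil_iff, hnil]; try omega
        have hk2 : l.take (k + 1) ≠ [] := by
          simp [List.take_eq_nil_iff, hnil]; try omega
        rw [chunks5_small hk1 (by rw [List.length_take]; omega),
            chunks5_small hk2 (by rw [List.length_take]; omega),
            take_succ_getD l k hk]
        simp
    · obtain ⟨k', rfl⟩ : ∃ k', k = k' + 5 := ⟨k - 5, by omega⟩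
      have hcl : (l.take 5).length = 5 := by simp; omega
      have hlen' : k' < (l.drop 5).length := by simp; omega
      have ht1 : l.take (k' + 5) = l.take 5 ++ (l.drop 5).take k' := by
        conv_lhs => rw [← List.take_append_drop 5 l]
        rw [List.take_append, List.take_of_length_le (by omega), hcl]
        simp
      have ht2 : l.take (k' + 5 + 1) = l.take 5 ++ (l.drop 5).take (k' + 1) := by
        conv_lhs => rw [← List.take_append_drop 5 l]
        rw [List.take_append, List.take_of_length_le (by omega), hcl]
        simp
      have hgd : l.getD (k' + 5) "" = (l.drop 5).getD k' "" := by
        rw [List.getD_eq_getElem l "" hk, List.getD_eq_getElem _ "" hlen']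
        rw [List.getElem_drop]
        congr 1; omega
      rw [ht1, ht2, chunks5_block hcl, chunks5_block hcl, hgd, Nat.add_mod_right,
          IH k' (by omega) (l.drop 5) hlen']
      by_cases hm : k' % 5 = 0
      · simp [hm]
      · rw [if_neg hm, if_neg hm]
        have hne : chunks5 ((l.drop 5).take k') ≠ [] := by
          apply chunks5_ne_nil
          have hnil : l.drop 5 ≠ [] := by
            intro h; rw [h] at hlen'; simp at hlen'
          simp [List.take_eq_nil_iff, hnil]; try omega
        cases hX : chunks5 ((l.drop 5).take k') with
        | nil => exact absurd hX hne
        | cons y ys => simp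

theorem build_range (l : List String) : ∀ (k : Nat), k ≤ l.length →
    (List.range k).foldl (fun arr (j : Nat) => buildStep l arr ((0 : Int) + (j : Int))) []
      = chunks5 (l.take k) := by
  intro k
  induction k with
  | zero => intro _; simp [chunks5_nil]
  | succ k ih =>
    intro hk
    rw [List.range_succ, List.foldl_append, ih (by omega)]
    simp only [List.foldl_cons, List.foldl_nil]
    rw [chunks5_take_succ k l (by omega)]
    unfold buildStep
    rw [zero_add, PySem.Int.mod_eq_emod_of_pos (by norm_num)]
    by_cases hm : k % 5 = 0
    · have hz : ((k : Int) % 5) = 0 := by omega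
      simp [hz, hm, PySem.List.pyGetD_natCast]
    · have hz : ¬ ((k : Int) % 5 = 0) := by omega
      simp [hz, hm, PySem.List.pyGetD_natCast]

theorem build_eq (l : List String) :
    (PySem.List.pyRange 0 (l.length : Int) 1).foldl (buildStep l) [] = chunks5 l := by
  rw [PySem.List.pyRange_one, List.foldl_map]
  have h := build_range l l.length le_rfl
  simp only [List.take_length] at h
  simpa using h

-- shape of the chunks: nonempty, at most 5 minerals
theorem chunks5_shape : ∀ (l : List String), ∀ c ∈ chunks5 l, c ≠ [] ∧ c.length ≤ 5 := by
  intro l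
  induction l using chunks5.induct with
  | case1 => simp [chunks5_nil]
  | case2 l h ih =>
    rw [chunks5, dif_neg h]
    intro c hc
    rcases List.mem_cons.1 hc with rfl | hc
    · constructor
      · simp [List.take_eq_nil_iff, h]
      · simp
    · exact ih c hc

-- ---- the single-step greedy on count triples (proof-side bridge between the two ports) ----
def stepT (st : Int × Nat × List Int) (c : Int × Int × Int) : Int × Nat × List Int :=
  match skipZeros st.2.2 st.2.1 with
  | none => st
  | some p =>
    (st.1 + (if p == 0 then c.1 + c.2.1 + c.2.2
             else if p == 1 then 5 * c.1 + c.2.1 + c.2.2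
             else 25 * c.1 + 5 * c.2.1 + c.2.2),
     p, st.2.2.set p (st.2.2.getD p 0 - 1))

theorem greedy_map (Z : List (List String)) :
    ∀ (st : Int × Nat × List Int),
      (Z.map countChunk).foldl stepT st = Z.foldl greedyStepA st := by
  induction Z with
  | nil => intro st; rfl
  | cons z t ih =>
    intro st
    simp only [List.map_cons, List.foldl_cons]
    have hstep : stepT st (countChunk z) = greedyStepA st z := by
      unfold greedyStepA stepT
      cases h : skipZeros st.2.2 st.2.1 with
      | none => rfl
      | some p => simp [countChunk_eq, fatigueSum_eq]
    rw [hstep]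
    exact ih _

theorem insertBy_map {α β : Type} (f : α → β) (q : β → β → Bool) (x : α) :
    ∀ (ys : List α),
      PySem.List.insertBy q (f x) (ys.map f) =
        (PySem.List.insertBy (fun a b => q (f a) (f b)) x ys).map f := by
  intro ys
  induction ys with
  | nil => rfl
  | cons y t ih =>
    simp only [List.map_cons, PySem.List.insertBy]
    by_cases h : q (f x) (f y) <;> simp [h, ih]

theorem foldl_insertBy_map {α β : Type} (f : α → β) (q : β → β → Bool) :
    ∀ (xs : List α) (acc : List α),
      (xs.map f).foldl (fun a y => PySem.List.insertBy q y a) (acc.map f) =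
        (xs.foldl (fun a x => PySem.List.insertBy (fun u v => q (f u) (f v)) x a) acc).map f := by
  intro xs
  induction xs with
  | nil => intro acc; rfl
  | cons x t ih =>
    intro acc
    simp only [List.map_cons, List.foldl_cons]
    rw [insertBy_map f q x acc]
    exact ih _

theorem sorted2_map {α β : Type} (f : α → β) (k1 k2 : β → Int) (xs : List α) :
    PySem.List.sorted2 (xs.map f) k1 k2 false =
      (PySem.List.sorted2 xs (fun a => k1 (f a)) (fun a => k2 (f a)) false).map f := by
  have h := foldl_insertBy_map f
    (fun u v => decide (k1 u < k1 v) || (!decide (k1 v < k1 u) && decide (k2 u < k2 v)))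
    xs []
  simpa [PySem.List.sorted2] using h

theorem slice_to_map {α β : Type} (f : α → β) (xs : List α) (b : Int) :
    PySem.List.slice (xs.map f) none (some b) = (PySem.List.slice xs none (some b)).map f := by
  by_cases hb : 0 ≤ b
  · rw [PySem.List.slice_to _ hb, PySem.List.slice_to _ hb, List.map_take]
  · have hb' : b = -(((-b).toNat : Nat) : Int) := by omega
    rw [hb', PySem.List.slice_to_neg_natCast _ _ (by omega),
        PySem.List.slice_to_neg_natCast _ _ (by omega), List.map_take, List.length_map]

-- A's keys on a triple
def k1T (c : Int × Int × Int) : Int := -(25 * c.1 + 5 * c.2.1 + c.2.2)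
def k2T (c : Int × Int × Int) : Int := c.1 + c.2.1 + c.2.2

theorem keys1_eq : (fun x : List String => k1T (countChunk x)) = sortKey := by
  funext x
  rw [countChunk_eq, sortKey_eq]; rfl

theorem keys2_eq : (fun x : List String => k2T (countChunk x)) = (fun x : List String => (x.length : Int)) := by
  funext x
  rw [countChunk_eq, len_DIE]; rfl

-- ---- combined key, validity, inverse ----
def K (c : Int × Int × Int) : Int := 8 * k1T c + k2T c

def ValidT (c : Int × Int × Int) : Prop :=
  0 ≤ c.1 ∧ 0 ≤ c.2.1 ∧ 0 ≤ c.2.2 ∧ 1 ≤ c.1 + c.2.1 + c.2.2 ∧ c.1 + c.2.1 + c.2.2 ≤ 5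

def keyOf (c : Int × Int × Int) : Int × Int :=
  (25 * c.1 + 5 * c.2.1 + c.2.2, c.1 + c.2.1 + c.2.2)

def invT (v s : Int) : Int × Int × Int :=
  (PySem.Int.floordiv (PySem.Int.floordiv (v - s) 4) 6,
   PySem.Int.floordiv (v - s) 4 - 6 * PySem.Int.floordiv (PySem.Int.floordiv (v - s) 4) 6,
   s + 5 * PySem.Int.floordiv (PySem.Int.floordiv (v - s) 4) 6 - PySem.Int.floordiv (v - s) 4)

theorem fd_keyOf {c : Int × Int × Int} (h : ValidT c) :
    PySem.Int.floordiv (PySem.Int.floordiv ((keyOf c).1 - (keyOf c).2) 4) 6 = c.1 := by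
  obtain ⟨c1, c2, c3⟩ := c
  obtain ⟨h1, h2, h3, h4, h5⟩ := h
  simp only [keyOf] at *
  rw [PySem.Int.floordiv_eq_ediv_of_pos (by norm_num), PySem.Int.floordiv_eq_ediv_of_pos (by norm_num)]
  have : (25 * c1 + 5 * c2 + c3 - (c1 + c2 + c3)) = 4 * (6 * c1 + c2) := by ring
  rw [this]
  omega

theorem invT_keyOf {c : Int × Int × Int} (h : ValidT c) :
    invT (keyOf c).1 (keyOf c).2 = c := by
  obtain ⟨c1, c2, c3⟩ := c
  obtain ⟨h1, h2, h3, h4, h5⟩ := h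
  have hfd := fd_keyOf (c := (c1, c2, c3)) ⟨h1, h2, h3, h4, h5⟩
  simp only [keyOf] at *
  simp only [invT, hfd]
  rw [PySem.Int.floordiv_eq_ediv_of_pos (by norm_num)] at hfd ⊢
  have : (25 * c1 + 5 * c2 + c3 - (c1 + c2 + c3)) = 4 * (6 * c1 + c2) := by ring
  rw [this] at hfd ⊢
  refine Prod.ext ?_ (Prod.ext ?_ ?_) <;> simp <;> omega

theorem keyOf_inj {a b : Int × Int × Int} (ha : ValidT a) (hb : ValidT b)
    (h : keyOf a = keyOf b) : a = b := by
  have := invT_keyOf ha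
  rw [h, invT_keyOf hb] at this
  exact this.symm

theorem K_eq (c : Int × Int × Int) : K c = -8 * (keyOf c).1 + (keyOf c).2 := by
  simp only [K, k1T, k2T, keyOf]; ring

theorem k2T_range {c : Int × Int × Int} (h : ValidT c) : 1 ≤ k2T c ∧ k2T c ≤ 5 := by
  unfold ValidT at h; unfold k2T; omega

theorem K_antisymm {a b : Int × Int × Int} (ha : ValidT a) (hb : ValidT b)
    (h1 : K a ≤ K b) (h2 : K b ≤ K a) : a = b := by
  have hKa := K_eq a; have hKb := K_eq b
  have e1 : (keyOf a).2 = k2T a := rfl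
  have e2 : (keyOf b).2 = k2T b := rfl
  have r1 := k2T_range ha; have r2 := k2T_range hb
  refine keyOf_inj ha hb (Prod.ext ?_ ?_) <;> omega

-- ---- sorted2 with the pair key = sorted with the combined key K (on valid elements) ----
theorem insertBy_congr {α : Type} (q q' : α → α → Bool) (S : List α)
    (h : ∀ a ∈ S, ∀ b ∈ S, q a b = q' a b) (x : α) (hx : x ∈ S) :
    ∀ ys, (∀ y ∈ ys, y ∈ S) → PySem.List.insertBy q x ys = PySem.List.insertBy q' x ys := by
  intro ys
  induction ys with
  | nil => intro _; rfl
  | cons y t ih =>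
    intro hys
    simp only [PySem.List.insertBy]
    rw [h x hx y (hys y (by simp))]
    by_cases hq : q' x y
    · simp [hq]
    · simp [hq, ih (fun z hz => hys z (by simp [hz]))]

theorem foldl_insertBy_congr {α : Type} (q q' : α → α → Bool) (S : List α)
    (h : ∀ a ∈ S, ∀ b ∈ S, q a b = q' a b) :
    ∀ (xs : List α), (∀ x ∈ xs, x ∈ S) → ∀ (acc : List α), (∀ y ∈ acc, y ∈ S) →
      xs.foldl (fun a x => PySem.List.insertBy q x a) acc =
      xs.foldl (fun a x => PySem.List.insertBy q' x a) acc := by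
  intro xs
  induction xs with
  | nil => intro _ acc _; rfl
  | cons x t ih =>
    intro hxs acc hacc
    simp only [List.foldl_cons]
    rw [insertBy_congr q q' S h x (hxs x (by simp)) acc hacc]
    apply ih (fun z hz => hxs z (by simp [hz]))
    intro y hy
    rcases (PySem.List.mem_insertBy _ x y acc).1 hy with rfl | hy
    · exact hxs y (by simp)
    · exact hacc y hy

theorem qlex_eq_K {a b : Int × Int × Int} (ha : ValidT a) (hb : ValidT b) :
    (decide (k1T a < k1T b) || (!decide (k1T b < k1T a) && decide (k2T a < k2T b))) =
      decide (K a < K b) := by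
  have h2a := k2T_range ha
  have h2b := k2T_range hb
  simp only [K]
  by_cases h1 : k1T a < k1T b
  · simp [h1]; omega
  · by_cases h1' : k1T b < k1T a
    · simp [h1, h1']; omega
    · by_cases h2 : k2T a < k2T b <;> simp [h1, h1', h2] <;> omega

theorem sorted2_eq_sortedK (xs : List (Int × Int × Int)) (hv : ∀ x ∈ xs, ValidT x) :
    PySem.List.sorted2 xs k1T k2T false = PySem.List.sorted xs K false := by
  rw [PySem.List.sorted_eq_foldl_insertBy]
  simp only [PySem.List.sorted2]
  apply foldl_insertBy_congr _ _ xs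
  · intro a hha b hhb
    exact qlex_eq_K (hv a hha) (hv b hhb)
  · intro x hx; exact hx
  · intro y hy; cases hy

-- ---- the grid of all possible (value, size) keys, best first ----
def grid : List (Int × Int) :=
  (PySem.List.pyRange 125 0 (-1)).flatMap (fun v => (PySem.List.pyRange 1 6 1).map (fun s => (v, s)))

theorem pyRange_down : PySem.List.pyRange 125 0 (-1) = (List.range 125).map (fun k : Nat => 125 - (k : Int)) := by decide

theorem pyRange_up : PySem.List.pyRange 1 6 1 = [1, 2, 3, 4, 5] := by decide

theorem mem_vlist {v : Int} : v ∈ PySem.List.pyRange 125 0 (-1) ↔ 1 ≤ v ∧ v ≤ 125 := by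
  rw [pyRange_down]
  constructor
  · intro h
    obtain ⟨k, hk, rfl⟩ := List.mem_map.1 h
    rw [List.mem_range] at hk
    omega
  · intro h
    exact List.mem_map.2 ⟨(125 - v).toNat, List.mem_range.2 (by omega), by omega⟩

theorem mem_slist {s : Int} : s ∈ PySem.List.pyRange 1 6 1 ↔ 1 ≤ s ∧ s ≤ 5 := by
  rw [pyRange_up]
  constructor
  · intro h; simp at h; omega
  · intro h; simp; omega

theorem mem_grid {p : Int × Int} : p ∈ grid ↔ (1 ≤ p.1 ∧ p.1 ≤ 125 ∧ 1 ≤ p.2 ∧ p.2 ≤ 5) := by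
  rw [grid, List.mem_flatMap]
  constructor
  · rintro ⟨v, hv, hp⟩
    obtain ⟨s, hs, rfl⟩ := List.mem_map.1 hp
    rw [mem_vlist] at hv
    rw [mem_slist] at hs
    exact ⟨hv.1, hv.2, hs.1, hs.2⟩
  · intro h
    refine ⟨p.1, mem_vlist.2 ⟨h.1, h.2.1⟩, List.mem_map.2 ⟨p.2, mem_slist.2 ⟨h.2.2.1, h.2.2.2⟩, rfl⟩⟩

theorem vlist_pairwise_ne :
    (PySem.List.pyRange 125 0 (-1)).Pairwise (fun v w => w < v) := by
  rw [pyRange_down, List.pairwise_map]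
  exact List.pairwise_lt_range.imp (fun {a b} h => by omega)

theorem nodup_grid : grid.Nodup := by
  rw [grid, List.nodup_flatMap]
  constructor
  · intro v _
    rw [pyRange_up]
    apply List.Nodup.map
    · intro a b hab
      simpa using congrArg Prod.snd hab
    · decide
  · apply vlist_pairwise_ne.imp
    intro v w hvw
    intro x hx hx'
    simp only [List.mem_map] at hx hx'
    obtain ⟨s, _, rfl⟩ := hx
    obtain ⟨s', _, h⟩ := hx'
    have := congrArg Prod.fst h
    simp at this
    omega

theorem pairwise_grid :
    grid.Pairwise (fun p q => q.1 < p.1 ∨ (p.1 = q.1 ∧ p.2 < q.2)) := by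
  rw [grid, List.flatMap_def, List.pairwise_flatten]
  constructor
  · intro l hl
    obtain ⟨v, _, rfl⟩ := List.mem_map.1 hl
    rw [pyRange_up, List.pairwise_map]
    exact (by decide : ([1, 2, 3, 4, 5] : List Int).Pairwise (· < ·)).imp
      (fun {a b} h => Or.inr ⟨rfl, h⟩)
  · rw [List.pairwise_map]
    apply vlist_pairwise_ne.imp
    intro v w hvw x hx y hy
    obtain ⟨s, _, rfl⟩ := List.mem_map.1 hx
    obtain ⟨s', _, rfl⟩ := List.mem_map.1 hy
    left; exact hvw

-- ---- B's key-building loop produces the chunk keys ----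
theorem keysAux_eq (l : List String) (j : Nat) :
    keysAux l j = ((chunks5 (l.drop j)).map (fun ch => keyOf (countChunk ch))) := by
  have H : ∀ (n j : Nat), l.length - j ≤ n →
      keysAux l j = ((chunks5 (l.drop j)).map (fun ch => keyOf (countChunk ch))) := by
    intro n
    induction n with
    | zero =>
      intro j hj
      rw [keysAux]
      have hge : ¬ j < l.length := by omega
      have hdrop : l.drop j = [] := by rw [List.drop_eq_nil_iff]; omega
      simp [hge, hdrop, chunks5_nil]
    | succ n ih =>
      intro j hj
      rw [keysAux]
      by_cases hlt : j < l.length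
      · rw [dif_pos hlt, ih (j + 5) (by omega)]
        have hs : PySem.List.slice l (some (j : Int)) (some ((j : Int) + 5))
            = (l.drop j).take 5 := by
          have h5 : ((j : Int) + 5) = ((j + 5 : Nat) : Int) := by push_cast; ring
          rw [h5, PySem.List.slice_natCast]
          congr 1; omega
        rw [hs]
        conv_rhs => rw [chunks5]
        have hne : l.drop j ≠ [] := by
          simp [List.drop_eq_nil_iff]; omega
        rw [dif_neg hne]
        simp [List.drop_drop, Nat.add_comm, keyOf]
      · rw [dif_neg hlt]
        have hdrop : l.drop j = [] := by rw [List.drop_eq_nil_iff]; omega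
        simp [hdrop, chunks5_nil]
  exact H (l.length - j) j le_rfl


-- ---- the canonical best-first list of triples ----
def blkOf (keysL : List (Int × Int)) (p : Int × Int) : List (Int × Int × Int) :=
  List.replicate (keysL.count p) (invT p.1 p.2)

def canonC (keysL : List (Int × Int)) : List (Int × Int × Int) := grid.flatMap (blkOf keysL)

theorem keyOf_mem_grid {t : Int × Int × Int} (h : ValidT t) : keyOf t ∈ grid := by
  rw [mem_grid]
  unfold ValidT at h
  refine ⟨?_, ?_, ?_, ?_⟩ <;> simp only [keyOf] <;> omega

theorem sum_map_single {α : Type} [DecidableEq α] (p0 : α) (f : α → Nat) :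
    ∀ (l : List α), l.Nodup → p0 ∈ l → (∀ p ∈ l, p ≠ p0 → f p = 0) →
      (l.map f).sum = f p0 := by
  intro l
  induction l with
  | nil => intro _ hm; cases hm
  | cons a t ih =>
    intro hnd hm h0
    rcases List.mem_cons.1 hm with rfl | hm'
    · simp only [List.map_cons, List.sum_cons]
      have : (t.map f).sum = 0 := by
        apply List.sum_eq_zero
        intro x hx
        obtain ⟨p, hp, rfl⟩ := List.mem_map.1 hx
        exact h0 p (by simp [hp]) (fun he => (List.nodup_cons.1 hnd).1 (he ▸ hp))
      simp [this]
    · simp only [List.map_cons, List.sum_cons]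
      have ha : f a = 0 := h0 a (by simp) (fun he => (List.nodup_cons.1 hnd).1 (he ▸ hm'))
      rw [ha, ih (List.nodup_cons.1 hnd).2 hm' (fun p hp => h0 p (by simp [hp])), Nat.zero_add]

theorem count_keysL {triples : List (Int × Int × Int)} (hv : ∀ t ∈ triples, ValidT t)
    {t : Int × Int × Int} (ht : t ∈ triples) :
    (triples.map keyOf).count (keyOf t) = triples.count t := by
  rw [List.count_eq_countP, List.countP_map, List.count_eq_countP]
  apply List.countP_congr
  intro u hu
  simp only [Function.comp_apply, beq_iff_eq, decide_eq_true_eq]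
  constructor
  · intro h; exact keyOf_inj (hv u hu) (hv t ht) h
  · intro h; rw [h]

theorem count_canon {triples : List (Int × Int × Int)} (hv : ∀ t ∈ triples, ValidT t)
    (t : Int × Int × Int) :
    (canonC (triples.map keyOf)).count t = triples.count t := by
  have hterm : ∀ p ∈ grid, (blkOf (triples.map keyOf) p).count t =
      if invT p.1 p.2 = t then (triples.map keyOf).count p else 0 := by
    intro p _
    rw [blkOf, List.count_replicate]
    split_ifs with h <;> simp_all
  have hmem_keys : ∀ p, (triples.map keyOf).count p ≠ 0 → invT p.1 p.2 = t →
      t ∈ triples ∧ p = keyOf t := by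
    intro p hc hi
    have hp : p ∈ triples.map keyOf := by
      by_contra hnp
      exact hc (List.count_eq_zero.2 hnp)
    obtain ⟨u, hu, rfl⟩ := List.mem_map.1 hp
    rw [invT_keyOf (hv u hu)] at hi
    subst hi
    exact ⟨hu, rfl⟩
  rw [canonC, List.flatMap_def, List.count_flatten, List.map_map]
  by_cases htm : t ∈ triples
  · have hvt := hv t htm
    have : (grid.map (List.count t ∘ blkOf (triples.map keyOf))).sum =
        (List.count t ∘ blkOf (triples.map keyOf)) (keyOf t) := by
      apply sum_map_single (keyOf t) _ grid nodup_grid (keyOf_mem_grid hvt)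
      intro p hp hne
      rw [Function.comp_apply, hterm p hp]
      split_ifs with h
      · by_cases hc : (triples.map keyOf).count p = 0
        · exact hc
        · exact absurd (hmem_keys p hc h).2 hne
      · rfl
    rw [this, Function.comp_apply, hterm (keyOf t) (keyOf_mem_grid hvt)]
    rw [if_pos (invT_keyOf hvt), count_keysL hv htm]
  · rw [List.count_eq_zero.2 htm]
    apply List.sum_eq_zero
    intro x hx
    obtain ⟨p, hp, rfl⟩ := List.mem_map.1 hx
    rw [Function.comp_apply, hterm p hp]
    split_ifs with h
    · by_cases hc : (triples.map keyOf).count p = 0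
      · exact hc
      · exact absurd (hmem_keys p hc h).1 htm
    · rfl

theorem perm_canon {triples : List (Int × Int × Int)} (hv : ∀ t ∈ triples, ValidT t) :
    (canonC (triples.map keyOf)).Perm triples :=
  List.perm_iff_count.2 (count_canon hv)

theorem K_of_inv {triples : List (Int × Int × Int)} (hv : ∀ t ∈ triples, ValidT t)
    {p : Int × Int} (hp : p ∈ triples.map keyOf) :
    K (invT p.1 p.2) = -8 * p.1 + p.2 := by
  obtain ⟨u, hu, rfl⟩ := List.mem_map.1 hp
  rw [invT_keyOf (hv u hu), K_eq]

theorem pairwise_canon {triples : List (Int × Int × Int)} (hv : ∀ t ∈ triples, ValidT t) :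
    (canonC (triples.map keyOf)).Pairwise (fun a b => K a ≤ K b) := by
  rw [canonC, List.flatMap_def, List.pairwise_flatten]
  constructor
  · intro l hl
    obtain ⟨p, _, rfl⟩ := List.mem_map.1 hl
    rw [blkOf, List.pairwise_replicate]
    right; exact le_refl _
  · rw [List.pairwise_map]
    refine pairwise_grid.imp_of_mem ?_
    intro p q hp hq hpq x hx y hy
    rw [blkOf, List.mem_replicate] at hx hy
    have hxm : p ∈ triples.map keyOf := List.count_pos_iff.1 (Nat.pos_of_ne_zero hx.1)
    have hym : q ∈ triples.map keyOf := List.count_pos_iff.1 (Nat.pos_of_ne_zero hy.1)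
    have hpg := mem_grid.1 hp
    have hqg := mem_grid.1 hq
    rw [hx.2, hy.2, K_of_inv hv hxm, K_of_inv hv hym]
    rcases hpq with h | ⟨h1, h2⟩ <;> omega

-- ---- B's batch loop vs the single-step greedy ----
def InvSt (st : Int × Nat × List Int) : Prop := ∀ x ∈ st.2.2, 0 ≤ x

def costP (p : Nat) (c : Int × Int × Int) : Int :=
  if p == 0 then c.1 + c.2.1 + c.2.2
  else if p == 1 then 5 * c.1 + c.2.1 + c.2.2
  else 25 * c.1 + 5 * c.2.1 + c.2.2

theorem skip_parts {picks : List Int} {pick p : Nat} (h : skipZeros picks pick = some p) :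
    ∃ j, (picks.drop pick).findIdx? (fun v => v != 0) = some j ∧ p = pick + j := by
  rw [skipZeros] at h
  cases hf : (picks.drop pick).findIdx? (fun v => v != 0) with
  | none => rw [hf] at h; cases h
  | some j => rw [hf] at h; exact ⟨j, rfl, (Option.some.inj h).symm⟩

theorem skip_some_lt {picks : List Int} {pick p : Nat} (h : skipZeros picks pick = some p) :
    p < picks.length := by
  obtain ⟨j, hf, rfl⟩ := skip_parts h
  obtain ⟨hj, _, _⟩ := List.findIdx?_eq_some_iff_getElem.1 hf
  rw [List.length_drop] at hj
  omega

theorem skip_getD_ne {picks : List Int} {pick p : Nat} (h : skipZeros picks pick = some p) :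
    picks.getD p 0 ≠ 0 := by
  obtain ⟨j, hf, rfl⟩ := skip_parts h
  obtain ⟨hj, hp, _⟩ := List.findIdx?_eq_some_iff_getElem.1 hf
  rw [List.getElem_drop] at hp
  rw [List.length_drop] at hj
  rw [List.getD_eq_getElem _ _ (by omega)]
  simpa using hp

theorem skip_here {picks : List Int} {p : Nat} (hp : p < picks.length)
    (hne : picks.getD p 0 ≠ 0) : skipZeros picks p = some p := by
  rw [skipZeros, List.drop_eq_getElem_cons hp, List.findIdx?_cons]
  have : picks[p] ≠ 0 := by rw [List.getD_eq_getElem _ _ hp] at hne; exact hne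
  simp [this]

theorem getD_set_self {l : List Int} {p : Nat} (hp : p < l.length) (x : Int) :
    (l.set p x).getD p 0 = x := by
  rw [List.getD_eq_getElem _ _ (by rw [List.length_set]; exact hp)]
  exact List.getElem_set_self _

theorem run_replicate (t : Int × Int × Int) :
    ∀ (k : Nat) (a : Int) (pick : Nat) (picks : List Int) (p : Nat),
      1 ≤ k → (k : Int) ≤ picks.getD p 0 → skipZeros picks pick = some p →
      (List.replicate k t).foldl stepT (a, pick, picks) =
        (a + k * costP p t, p, picks.set p (picks.getD p 0 - k)) := by
  intro k
  induction k with
  | zero => intro _ _ _ _ h1; omega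
  | succ k ih =>
    intro a pick picks p _ hk hskip
    have hlt := skip_some_lt hskip
    rw [List.replicate_succ, List.foldl_cons]
    have hstep : stepT (a, pick, picks) t =
        (a + costP p t, p, picks.set p (picks.getD p 0 - 1)) := by
      rw [stepT]
      simp only [hskip]
      rfl
    rw [hstep]
    by_cases hk0 : k = 0
    · subst hk0
      simp only [List.replicate_zero, List.foldl_nil]
      refine congrArg₂ Prod.mk (by push_cast; ring) (congrArg _ (by norm_num))
    · rw [ih (a + costP p t) p (picks.set p (picks.getD p 0 - 1)) p (by omega)
        (by rw [getD_set_self hlt]; omega)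
        (skip_here (by rw [List.length_set]; exact hlt) (by rw [getD_set_self hlt]; omega))]
      rw [getD_set_self hlt, List.set_set]
      refine congrArg₂ Prod.mk (by push_cast; ring) (congrArg _ (by push_cast; ring_nf))

theorem foldl_stepT_skipnone {st : Int × Nat × List Int}
    (h : skipZeros st.2.2 st.2.1 = none) (l : List (Int × Int × Int)) :
    l.foldl stepT st = st := by
  induction l with
  | nil => rfl
  | cons x t ih =>
    have : stepT st x = st := by rw [stepT]; simp only [h]
    rw [List.foldl_cons, this, ih]

theorem stepT_inv {st : Int × Nat × List Int} (h : InvSt st) (c : Int × Int × Int) :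
    InvSt (stepT st c) := by
  rw [stepT]
  cases hskip : skipZeros st.2.2 st.2.1 with
  | none => exact h
  | some p =>
    intro x hx
    rcases List.mem_or_eq_of_mem_set hx with hx' | rfl
    · exact h x hx'
    · have hlt := skip_some_lt hskip
      have := h _ (List.getElem_mem hlt)
      have hgd : st.2.2.getD p 0 = st.2.2[p] := List.getD_eq_getElem _ _ hlt
      have hne := skip_getD_ne hskip
      omega

theorem foldl_stepT_inv (l : List (Int × Int × Int)) :
    ∀ {st : Int × Nat × List Int}, InvSt st → InvSt (l.foldl stepT st) := by
  induction l with
  | nil => intro st h; exact h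
  | cons x t ih => intro st h; exact ih (stepT_inv h x)

theorem cost_eq_costP {t : Int × Int × Int} (hval : ValidT t) {v s : Int}
    (hk : keyOf t = (v, s)) (p : Nat) :
    (if p == 0 then s
     else if p == 1 then 4 * PySem.Int.floordiv (PySem.Int.floordiv (v - s) 4) 6 + s
     else v) = costP p t := by
  have hv : v = (keyOf t).1 := by rw [hk]
  have hs : s = (keyOf t).2 := by rw [hk]
  subst hv; subst hs
  rw [fd_keyOf hval]
  rw [costP]
  obtain ⟨c1, c2, c3⟩ := t
  simp only [keyOf]
  split_ifs <;> ring

theorem consume_eq {t : Int × Int × Int} (hval : ValidT t) {v s : Int}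
    (hk : keyOf t = (v, s)) :
    ∀ (fuel : Nat) (cnt : Int) (st : Int × Nat × List Int), cnt.toNat ≤ fuel → InvSt st →
      consume v s fuel cnt st = (List.replicate cnt.toNat t).foldl stepT st := by
  intro fuel
  induction fuel with
  | zero =>
    intro cnt st hcnt _
    have : cnt.toNat = 0 := by omega
    rw [this, consume, List.replicate_zero, List.foldl_nil]
  | succ fuel ih =>
    intro cnt st hcnt hinv
    rw [consume]
    by_cases hc : cnt ≤ 0
    · rw [if_pos hc]
      have : cnt.toNat = 0 := by omega
      rw [this, List.replicate_zero, List.foldl_nil]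
    · rw [if_neg hc]
      cases hskip : skipZeros st.2.2 st.2.1 with
      | none => rw [foldl_stepT_skipnone hskip]
      | some p =>
        obtain ⟨a, pick, picks⟩ := st
        simp only at hskip ⊢
        have hlt := skip_some_lt hskip
        have hne := skip_getD_ne hskip
        have hge : 0 ≤ picks.getD p 0 := by
          rw [List.getD_eq_getElem _ _ hlt]
          exact hinv _ (List.getElem_mem hlt)
        have htake1 : 1 ≤ min cnt (picks.getD p 0) := by omega
        have htakele : min cnt (picks.getD p 0) ≤ cnt := by omega
        have hsplit : cnt.toNat = (min cnt (picks.getD p 0)).toNat + (cnt - min cnt (picks.getD p 0)).toNat := by omega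
        rw [hsplit, List.replicate_add, List.foldl_append]
        rw [run_replicate t (min cnt (picks.getD p 0)).toNat a pick picks p (by omega)
          (by omega) hskip]
        rw [ih (cnt - min cnt (picks.getD p 0)) _ (by omega) ?_]
        · rw [cost_eq_costP hval hk p]
          have hc1 : ((min cnt (picks.getD p 0)).toNat : Int) = min cnt (picks.getD p 0) := by omega
          rw [hc1]
        · intro x hx
          rcases List.mem_or_eq_of_mem_set hx with hx' | rfl
          · exact hinv x hx'
          · omega

theorem foldl_congr_inv {α : Type} (f g : (Int × Nat × List Int) → α → (Int × Nat × List Int)) :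
    ∀ (l : List α),
      (∀ st x, x ∈ l → InvSt st → f st x = g st x) →
      (∀ st x, InvSt st → InvSt (g st x)) →
      ∀ st, InvSt st → l.foldl f st = l.foldl g st := by
  intro l
  induction l with
  | nil => intro _ _ st _; rfl
  | cons x t ih =>
    intro hfg hg st hst
    rw [List.foldl_cons, List.foldl_cons, hfg st x (by simp) hst]
    exact ih (fun st' y hy => hfg st' y (by simp [hy])) hg _ (hg st x hst)

theorem nested_consume_eq_grid (q : Int × Int → Int) (init : Int × Nat × List Int) :
    (PySem.List.pyRange 125 0 (-1)).foldl (fun st v =>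
      (PySem.List.pyRange 1 6 1).foldl (fun st s =>
        consume v s (q (v, s)).toNat (q (v, s)) st) st) init =
    grid.foldl (fun st p => consume p.1 p.2 (q p).toNat (q p) st) init := by
  rw [grid, List.foldl_flatMap]
  simp only [List.foldl_map]

theorem grid_consume_eq_canon {triples : List (Int × Int × Int)}
    (hv : ∀ t ∈ triples, ValidT t) (init : Int × Nat × List Int) (hinv : InvSt init) :
    grid.foldl (fun st p => consume p.1 p.2 ((triples.map keyOf).count p) (((triples.map keyOf).count p : Nat) : Int) st) init =
    (canonC (triples.map keyOf)).foldl stepT init := by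
  rw [canonC, List.flatMap_def, List.foldl_flatten, List.foldl_map]
  apply foldl_congr_inv _ _ grid _ _ init hinv
  · intro st p _ hst
    by_cases hc : (triples.map keyOf).count p = 0
    · rw [hc, blkOf, hc, List.replicate_zero, List.foldl_nil]
      rfl
    · have hp : p ∈ triples.map keyOf := List.count_pos_iff.1 (Nat.pos_of_ne_zero hc)
      obtain ⟨u, hu, rfl⟩ := List.mem_map.1 hp
      rw [consume_eq (hv u hu) (by obtain ⟨x, y⟩ := keyOf u; rfl) _ _ _ (by omega) hst]
      rw [blkOf, invT_keyOf (hv u hu)]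
      simp
  · intro st p hst
    exact foldl_stepT_inv _ hst

theorem valid_triples (minerals : List String) (b : Int) :
    ∀ t ∈ (PySem.List.slice (chunks5 minerals) none (some b)).map countChunk, ValidT t := by
  intro t ht
  obtain ⟨ch, hch, rfl⟩ := List.mem_map.1 ht
  have hmem : ch ∈ chunks5 minerals := by
    by_cases hb : 0 ≤ b
    · rw [PySem.List.slice_to _ hb] at hch
      exact List.mem_of_mem_take hch
    · have hb' : b = -(((-b).toNat : Nat) : Int) := by omega
      rw [hb', PySem.List.slice_to_neg_natCast _ _ (by omega)] at hch
      exact List.mem_of_mem_take hch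
  obtain ⟨hne, hlen⟩ := chunks5_shape minerals ch hmem
  rw [countChunk_eq]
  have hlen1 : 1 ≤ ch.length := by
    cases ch with
    | nil => exact absurd rfl hne
    | cons _ _ => simp
  have hd : (0 : Int) ≤ cntD ch := Int.natCast_nonneg _
  have hi : (0 : Int) ≤ cntI ch := Int.natCast_nonneg _
  have he : (0 : Int) ≤ cntE ch := Int.natCast_nonneg _
  have hsum := len_DIE ch
  unfold ValidT
  refine ⟨?_, ?_, ?_, ?_, ?_⟩ <;> dsimp only <;> omega

-- ---- the main equality ----
theorem main_eq (picks : List Int) (minerals : List String)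
    (hpre : ∀ x ∈ picks, 0 ≤ x) :
    solution picks minerals = solution_alt picks minerals := by
  dsimp only [solution, solution_alt]
  rw [build_eq, keysAux_eq, List.drop_zero]
  rw [PySem.Dict.foldl_insert_getD_add_one_eq_counter]
  set b : Int := picks.foldl (· + ·) 0 with hb
  set triples : List (Int × Int × Int) :=
    (PySem.List.slice (chunks5 minerals) none (some b)).map countChunk with htr
  have hv : ∀ t ∈ triples, ValidT t := valid_triples minerals b
  have hkeys : PySem.List.slice ((chunks5 minerals).map (fun ch => keyOf (countChunk ch))) none (some b)
      = triples.map keyOf := by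
    rw [htr, List.map_map]
    rw [show (fun ch => keyOf (countChunk ch)) = (keyOf ∘ countChunk) from rfl]
    exact slice_to_map _ _ _
  rw [hkeys]
  -- A side: fold of stepT over the sorted triples
  rw [← greedy_map]
  rw [← keys1_eq, ← keys2_eq, ← sorted2_map]
  rw [← htr]
  rw [sorted2_eq_sortedK triples hv]
  -- B side: fold of stepT over the canonical list
  have hq : ∀ p : Int × Int, (PySem.Dict.counter (triples.map keyOf)).getD p 0 =
      (((triples.map keyOf).count p : Nat) : Int) := by
    intro p
    rw [PySem.Dict.getD_counter]
  simp only [hq]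
  rw [nested_consume_eq_grid (q := fun p => (((triples.map keyOf).count p : Nat) : Int))]
  have hinv : InvSt ((0 : Int), (0 : Nat), picks) := by
    intro x hx; exact hpre x hx
  have hgrid : grid.foldl (fun st p =>
      consume p.1 p.2 ((((triples.map keyOf).count p : Nat) : Int)).toNat ((((triples.map keyOf).count p : Nat) : Int)) st) ((0 : Int), (0 : Nat), picks) =
      (canonC (triples.map keyOf)).foldl stepT ((0 : Int), (0 : Nat), picks) := by
    have := grid_consume_eq_canon hv ((0 : Int), (0 : Nat), picks) hinv
    simpa using this
  rw [hgrid]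
  -- the two lists are equal
  have hlist : PySem.List.sorted triples K false = canonC (triples.map keyOf) := by
    apply List.eq_of_perm_of_sorted (le := fun a b => K a ≤ K b)
    · intro x y hx hy h1 h2
      have hxm : x ∈ triples := (PySem.List.sorted_perm triples K false).mem_iff.1 hx
      have hym : y ∈ triples := (perm_canon hv).mem_iff.1 hy
      exact K_antisymm (hv x hxm) (hv y hym) h1 h2
    · exact PySem.List.sorted_pairwise triples K
    · exact pairwise_canon hv
    · exact (PySem.List.sorted_perm triples K false).trans (perm_canon hv).symm
  rw [hlist]
-- ===== VERDICT (by name: the statement is the Claim_ definition above) =====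
theorem solution_spec : Claim_equal_solution := by
  intro picks minerals _ hpre
  unfold Spec_solution
  exact main_eq picks minerals hpre
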